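-- pv_equiv track=rewrite | github.com/Saurabh-Shelke/custom_salary | salary/salary/report/custom_salary/custom_salary.py | detect_loan_repayment_component
-- ===== SOURCE A (Python) =====
-- def detect_loan_repayment_component(ded_types):
-- 	"""
-- 	Detect a deduction component that corresponds to 'Loan Repayment' (robust heuristics).
-- 	Returns the exact component label if found, otherwise None.
-- 	"""
-- 	if not ded_types:
-- 		return None
-- 	lowered = [d.strip().lower() for d in ded_types]
-- 	for i, d in enumerate(lowered):
-- 		# look for common patterns
-- 		if "loan" in d and ("repay" in d or "repayment" in d):
-- 			return ded_types[i]
-- 		# sometimes label might be 'Loan Repayment' exact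
-- 		if d == "loan repayment":
-- 			return ded_types[i]
-- 	# fallback: exact match
-- 	for i, d in enumerate(lowered):
-- 		if d == "loan_repayment" or d == "loanrepayment":
-- 			return ded_types[i]
-- 	return None
-- ===== SOURCE B (Python) =====
-- def detect_loan_repayment_component(ded_types):
--     """Single pass: return on a primary match immediately; remember the first
--     fallback exact-match label and return it (or None) after the loop."""
--     fallback = None
--     for label in ded_types:
--         d = label.strip().lower()
--         if ("loan" in d and "repay" in d) or d == "loan repayment":
--             return label
--         if fallback is None and (d == "loan_repayment" or d == "loanrepayment"):
--             fallback = label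
--     return fallback
-- ===== Notes on version B (the rewrite author's own statement) =====
-- stated objective: simpler
-- what changed: Replaces the empty-list guard, the precomputed lowered list and two separate index-based scans by a single pass over the labels that normalizes each label in place, returns immediately on a primary match and carries the first fallback match in an accumulator returned after the loop; the redundant 'repayment' test is dropped since 'repay' subsumes it.
import Mathlib
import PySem

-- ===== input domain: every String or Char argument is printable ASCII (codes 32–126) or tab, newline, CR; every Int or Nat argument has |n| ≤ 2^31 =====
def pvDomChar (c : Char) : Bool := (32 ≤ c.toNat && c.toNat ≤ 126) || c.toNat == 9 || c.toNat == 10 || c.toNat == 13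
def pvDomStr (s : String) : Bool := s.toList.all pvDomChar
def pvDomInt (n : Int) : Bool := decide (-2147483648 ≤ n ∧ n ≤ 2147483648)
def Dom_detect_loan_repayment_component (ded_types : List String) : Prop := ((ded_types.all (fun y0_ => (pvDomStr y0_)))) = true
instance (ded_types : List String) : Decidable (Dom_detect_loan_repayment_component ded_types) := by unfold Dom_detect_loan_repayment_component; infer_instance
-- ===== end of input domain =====

-- B is a single pass with a fallback accumulator instead of A's guard + lowered list + two index scans (objective: simpler).

-- ===== PORT A =====
-- d.strip().lower()
def pvNormA (d : String) : String := PySem.Str.lower (PySem.Str.strip d)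
-- "loan" in d and ("repay" in d or "repayment" in d)
def pvCondA1 (d : String) : Bool :=
  PySem.Str.isIn "loan" d && (PySem.Str.isIn "repay" d || PySem.Str.isIn "repayment" d)
-- first loop: for i, d in enumerate(lowered): two ifs, return ded_types[i]
def pvLoopA1 (ded : List String) : List (Int × String) → Option String
  | [] => none
  | (i, d) :: rest =>
      if pvCondA1 d then PySem.List.pyGet? ded i
      else if d == "loan repayment" then PySem.List.pyGet? ded i
      else pvLoopA1 ded rest
-- second loop: fallback exact match
def pvLoopA2 (ded : List String) : List (Int × String) → Option String
  | [] => none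
  | (i, d) :: rest =>
      if d == "loan_repayment" || d == "loanrepayment" then PySem.List.pyGet? ded i
      else pvLoopA2 ded rest

def detect_loan_repayment_component (ded_types : List String) : Option String :=
  if ded_types = [] then none
  else
    let lowered := ded_types.map pvNormA
    match pvLoopA1 ded_types (PySem.List.enumerate lowered) with
    | some x => some x
    | none => pvLoopA2 ded_types (PySem.List.enumerate lowered)

-- ===== PORT B =====
def pvCondB1 (d : String) : Bool :=
  (PySem.Str.isIn "loan" d && PySem.Str.isIn "repay" d) || d == "loan repayment"
def pvCondB2 (d : String) : Bool := d == "loan_repayment" || d == "loanrepayment"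
def pvNormB (label : String) : String := PySem.Str.lower (PySem.Str.strip label)
-- one pass, fallback accumulator
def pvLoopB : List String → Option String → Option String
  | [], fb => fb
  | label :: rest, fb =>
      let d := pvNormB label
      if pvCondB1 d then some label
      else pvLoopB rest (if fb.isNone && pvCondB2 d then some label else fb)

def detect_loan_repayment_component_alt (ded_types : List String) : Option String :=
  pvLoopB ded_types none

-- ===== PRECONDITION & SPEC =====
def Spec_detect_loan_repayment_component (ded_types : List String) (out : Option String) : Prop := out = detect_loan_repayment_component_alt ded_types
instance (ded_types : List String) (out : Option String) : Decidable (Spec_detect_loan_repayment_component ded_types out) := by unfold Spec_detect_loan_repayment_component; infer_instance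

-- ===== CLAIM (what is proved, stated in full; the proofs are below) =====
def Claim_equal_detect_loan_repayment_component : Prop := ∀ (ded_types : List String), Dom_detect_loan_repayment_component ded_types → Spec_detect_loan_repayment_component ded_types (detect_loan_repayment_component ded_types)

-- ===== LEMMAS AND PROOFS =====

-- A's first condition pair equals B's primary condition ("repayment" contains "repay")
theorem pvCond1_eq (d : String) :
    (pvCondA1 d || (d == "loan repayment")) = pvCondB1 d := by
  unfold pvCondA1 pvCondB1
  by_cases h : PySem.Str.isIn "repayment" d = true
  · have h' : PySem.Str.isIn "repay" d = true := by
      rw [PySem.Str.isIn_iff_infix] at h ⊢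
      exact List.IsInfix.trans (by decide) h
    rw [h, h', Bool.or_self, Bool.and_true]
  · rw [Bool.not_eq_true] at h
    rw [h, Bool.or_false]

theorem loopA1_spec (pre suf : List String) :
    pvLoopA1 (pre ++ suf) (PySem.List.enumerate (suf.map pvNormA) pre.length) =
      suf.find? (fun x => pvCondA1 (pvNormA x) || (pvNormA x == "loan repayment")) := by
  induction suf generalizing pre with
  | nil => simp [pvLoopA1, PySem.List.enumerate]
  | cons x rest ih =>
    rw [List.map_cons, PySem.List.enumerate_cons, pvLoopA1, List.find?_cons]
    by_cases h1 : pvCondA1 (pvNormA x) = true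
    · simp [h1, PySem.List.pyGet?_append_length]
    · by_cases h2 : (pvNormA x == "loan repayment") = true
      · simp [h1, h2, PySem.List.pyGet?_append_length]
      · have hrec := ih (pre ++ [x])
        simp only [List.append_assoc, List.cons_append, List.nil_append,
          List.length_append, List.length_cons, List.length_nil] at hrec
        simp only [h1, h2, if_false, Bool.or_eq_true, false_or]
        rw [show ((pre.length : Int) + 1) = ((pre.length + 1 : Nat) : Int) by push_cast; ring]
        simpa [h1, h2] using hrec

theorem loopA2_spec (pre suf : List String) :
    pvLoopA2 (pre ++ suf) (PySem.List.enumerate (suf.map pvNormA) pre.length) =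
      suf.find? (fun x => pvCondB2 (pvNormA x)) := by
  induction suf generalizing pre with
  | nil => simp [pvLoopA2, PySem.List.enumerate]
  | cons x rest ih =>
    rw [List.map_cons, PySem.List.enumerate_cons, pvLoopA2, List.find?_cons,
      show (pvNormA x == "loan_repayment" || pvNormA x == "loanrepayment") =
        pvCondB2 (pvNormA x) from rfl]
    by_cases h : pvCondB2 (pvNormA x) = true
    · simp [h, PySem.List.pyGet?_append_length]
    · rw [Bool.not_eq_true] at h
      have hrec := ih (pre ++ [x])
      simp only [List.append_assoc, List.cons_append, List.nil_append,
        List.length_append, List.length_cons, List.length_nil] at hrec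
      simp only [h, Bool.false_eq_true, if_false]
      rw [show ((pre.length : Int) + 1) = ((pre.length + 1 : Nat) : Int) by push_cast; ring]
      simpa [h] using hrec

theorem loopB_spec (ded : List String) (fb : Option String) :
    pvLoopB ded fb =
      match ded.find? (fun x => pvCondB1 (pvNormB x)) with
      | some x => some x
      | none =>
          match fb with
          | some y => some y
          | none => ded.find? (fun x => pvCondB2 (pvNormB x)) := by
  induction ded generalizing fb with
  | nil => cases fb <;> simp [pvLoopB]
  | cons x rest ih =>
    rw [pvLoopB, List.find?_cons]
    by_cases h1 : pvCondB1 (pvNormB x) = true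
    · simp [h1]
    · rw [Bool.not_eq_true] at h1
      simp only [h1, Bool.false_eq_true, if_false]
      cases fb with
      | some y =>
        simp only [Option.isNone_some, Bool.false_and, Bool.false_eq_true, if_false]
        rw [ih (some y)]
      | none =>
        simp only [Option.isNone_none, Bool.true_and]
        by_cases h2 : pvCondB2 (pvNormB x) = true
        · rw [if_pos h2, ih (some x), List.find?_cons]
          simp [h2]
        · rw [Bool.not_eq_true] at h2
          rw [if_neg (by simp [h2]), ih none, List.find?_cons]
          simp [h2]

-- ===== VERDICT (by name: the statement is the Claim_ definition above) =====
theorem detect_loan_repayment_component_spec : Claim_equal_detect_loan_repayment_component := by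
  intro ded _
  unfold Spec_detect_loan_repayment_component detect_loan_repayment_component
    detect_loan_repayment_component_alt
  rw [loopB_spec]
  have hp1 : (fun x => pvCondA1 (pvNormA x) || (pvNormA x == "loan repayment")) =
      (fun x => pvCondB1 (pvNormB x)) := funext fun x => by rw [pvCond1_eq]; rfl
  have hp2 : (fun x => pvCondB2 (pvNormA x)) = (fun x => pvCondB2 (pvNormB x)) := rfl
  by_cases hnil : ded = []
  · subst hnil; simp
  · simp only [hnil, if_false]
    have h1 := loopA1_spec [] ded
    have h2 := loopA2_spec [] ded
    simp only [List.nil_append, List.length_nil, Nat.cast_zero] at h1 h2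
    rw [h1, h2, hp1, hp2]
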